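-- pv_equiv track=rewrite | github.com/kcnops/adventofcode2025 | day3/batteries.py | get_largest_index_and_digit
-- ===== SOURCE A (Python) =====
-- from typing import List, Optional
--
-- def get_largest_index_and_digit(int_list: List[int]) -> (int, int):
--     largest = 0
--     largest_idx = None
--     for idx, digit in enumerate(int_list):
--         if digit > largest:
--             largest = digit
--             largest_idx = idx
--     if largest_idx is None:
--         raise ValueError('Did not find any battery above 0 or algorithm error.')
--     return largest_idx, largest
-- ===== SOURCE B (Python) =====
-- def get_largest_index_and_digit(int_list):
--     if not int_list:
--         raise ValueError('Did not find any battery above 0 or algorithm error.')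
--     largest = max(int_list)
--     if largest <= 0:
--         raise ValueError('Did not find any battery above 0 or algorithm error.')
--     return int_list.index(largest), largest
-- ===== Notes on version B (the rewrite author's own statement) =====
-- stated objective: idiomatic
-- what changed: Replaces the manual running-max loop with the built-in max() plus list.index() of that maximum (stdlib one-pass primitives instead of a hand-maintained accumulator), keeping the same first-occurrence tie-break and the ValueError when no element is positive.
import Mathlib
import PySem

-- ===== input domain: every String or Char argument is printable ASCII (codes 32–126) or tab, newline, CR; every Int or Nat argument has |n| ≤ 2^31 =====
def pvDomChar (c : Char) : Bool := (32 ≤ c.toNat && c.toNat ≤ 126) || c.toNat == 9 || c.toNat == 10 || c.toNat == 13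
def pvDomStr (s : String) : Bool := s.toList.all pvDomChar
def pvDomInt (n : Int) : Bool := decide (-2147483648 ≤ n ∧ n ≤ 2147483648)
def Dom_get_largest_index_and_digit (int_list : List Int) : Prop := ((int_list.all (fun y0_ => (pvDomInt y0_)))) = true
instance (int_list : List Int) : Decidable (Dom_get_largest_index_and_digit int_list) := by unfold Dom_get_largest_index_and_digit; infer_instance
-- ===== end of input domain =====

-- B replaces A's manual running-max loop by max() plus list.index(); return values agree wherever A returns (Pre_: some element is positive).
-- ===== PORT A =====
-- the for-loop: state (largest, largest_idx), idx counts up from 0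
def laLoop : List Int → Int → Int → Option Int → Int × Option Int
  | [], _, largest, li => (largest, li)
  | d :: rest, i, largest, li =>
    if largest < d then laLoop rest (i + 1) d (some i)
    else laLoop rest (i + 1) largest li

def get_largest_index_and_digit (int_list : List Int) : Int × Int :=
  match laLoop int_list 0 0 none with
  | (largest, some li) => (li, largest)
  | (_, none) => (0, 0)   -- raise ValueError: excluded by Pre_

-- ===== PORT B =====
def get_largest_index_and_digit_alt (int_list : List Int) : Int × Int :=
  match PySem.List.max? int_list (fun y => y) with
  | none => (0, 0)   -- empty list: raise ValueError, excluded by Pre_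
  | some m =>
    if m ≤ 0 then (0, 0)   -- raise ValueError, excluded by Pre_
    else
      match PySem.List.index? int_list m with
      | some i => ((i : Int), m)
      | none => (0, 0)   -- unreachable: m ∈ int_list

-- ===== PRECONDITION & SPEC =====
-- Pre_: exactly the inputs where A returns (A raises ValueError iff no element is > 0)
def Pre_get_largest_index_and_digit (int_list : List Int) : Prop := ∃ x ∈ int_list, 0 < x
instance (int_list : List Int) : Decidable (Pre_get_largest_index_and_digit int_list) := by unfold Pre_get_largest_index_and_digit; infer_instance
def pvWitness_get_largest_index_and_digit : List Int := [2, -1, 5, 5, 0]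
def Spec_get_largest_index_and_digit (int_list : List Int) (out : Int × Int) : Prop := out = get_largest_index_and_digit_alt int_list
instance (int_list : List Int) (out : Int × Int) : Decidable (Spec_get_largest_index_and_digit int_list out) := by unfold Spec_get_largest_index_and_digit; infer_instance

-- ===== CLAIM (what is proved, stated in full; the proofs are below) =====
def Claim_equal_get_largest_index_and_digit : Prop := ∀ (int_list : List Int), Dom_get_largest_index_and_digit int_list → Pre_get_largest_index_and_digit int_list → Spec_get_largest_index_and_digit int_list (get_largest_index_and_digit int_list)

-- ===== LEMMAS AND PROOFS =====

-- once the accumulator dominates the rest of the list, the loop changes nothing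
lemma laLoop_stable : ∀ (xs : List Int) (i largest : Int) (li : Option Int),
    (∀ x ∈ xs, x ≤ largest) → laLoop xs i largest li = (largest, li) := by
  intro xs
  induction xs with
  | nil => intro _ _ _ _; rfl
  | cons d t ih =>
    intro i largest li h
    have hd : d ≤ largest := h d (by simp)
    simp only [laLoop, if_neg (not_lt.mpr hd)]
    exact ih _ _ _ (fun x hx => h x (by simp [hx]))

-- when some element beats the accumulator, the loop returns the list maximum
-- and records the offset of its first occurrence
lemma laLoop_pos : ∀ (xs : List Int) (i largest : Int) (li : Option Int) (m : Int) (j : Nat),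
    (∃ x ∈ xs, largest < x) →
    PySem.List.max? xs (fun y => y) = some m →
    PySem.List.index? xs m = some j →
    laLoop xs i largest li = (m, some (i + (j : Int))) := by
  intro xs
  induction xs with
  | nil => intro _ _ _ _ _ h; exact absurd h (by simp)
  | cons d t ih =>
    intro i largest li m j hex hmax hidx
    have hmmem : m ∈ d :: t := PySem.List.max?_mem hmax
    have hismax : ∀ y ∈ d :: t, y ≤ m := PySem.List.max?_isMax hmax
    by_cases hbeat : largest < d
    · simp only [laLoop, if_pos hbeat]
      by_cases htex : ∃ x ∈ t, d < x
      · -- the maximum lies strictly beyond the head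
        obtain ⟨x, hxt, hdx⟩ := htex
        have hxm : x ≤ m := hismax x (by simp [hxt])
        have hdm : d < m := lt_of_lt_of_le hdx hxm
        -- m ∈ t
        have hmt : m ∈ t := by
          rcases List.mem_cons.mp hmmem with h | h
          · omega
          · exact h
        -- max? t = some m
        obtain ⟨m', hm'⟩ : ∃ m', PySem.List.max? t (fun y => y) = some m' := by
          cases h : PySem.List.max? t (fun y => y) with
          | none => exact absurd ((PySem.List.max?_eq_none_iff _ _).mp h) (List.ne_nil_of_mem hxt)
          | some v => exact ⟨v, rfl⟩
        have hm'm : m' = m := le_antisymm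
          (hismax m' (by simp [PySem.List.max?_mem hm']))
          (PySem.List.max?_isMax hm' m hmt)
        -- index on the tail
        have hdne : d ≠ m := by omega
        rw [PySem.List.index?_cons_of_ne _ hdne] at hidx
        cases hjt : PySem.List.index? t m with
        | none => rw [hjt] at hidx; simp at hidx
        | some j' =>
          rw [hjt] at hidx
          simp only [Option.map_some] at hidx
          have hj : j = j' + 1 := (Option.some.injEq _ _).mp hidx |>.symm
          have := ih (i + 1) d (some i) m j' ⟨x, hxt, hdx⟩ (hm'm ▸ hm') hjt
          rw [this, hj]
          congr 1; congr 1; push_cast; ring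
      · -- the head is the maximum; the loop just recorded it
        push Not at htex
        have hst := laLoop_stable t (i + 1) d (some i) htex
        have hmd : m = d := le_antisymm
          (by rcases List.mem_cons.mp hmmem with h | h
              · omega
              · exact htex m h)
          (hismax d (by simp))
        rw [hst, hmd]
        have : PySem.List.index? (d :: t) d = some 0 := PySem.List.index?_cons_self d t
        rw [hmd] at hidx; rw [this] at hidx
        have hj : j = 0 := ((Option.some.injEq _ _).mp hidx).symm
        simp [hj]
    · -- head does not beat the accumulator: the witness (and the max) are in the tail
      simp only [laLoop, if_neg hbeat]
      obtain ⟨x, hxmem, hlx⟩ := hex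
      have hdle : d ≤ largest := not_lt.mp hbeat
      have hxt : x ∈ t := by
        rcases List.mem_cons.mp hxmem with h | h
        · omega
        · exact h
      have hxm : x ≤ m := hismax x hxmem
      have hdm : d < m := by omega
      have hmt : m ∈ t := by
        rcases List.mem_cons.mp hmmem with h | h
        · omega
        · exact h
      obtain ⟨m', hm'⟩ : ∃ m', PySem.List.max? t (fun y => y) = some m' := by
        cases h : PySem.List.max? t (fun y => y) with
        | none => exact absurd ((PySem.List.max?_eq_none_iff _ _).mp h) (List.ne_nil_of_mem hxt)
        | some v => exact ⟨v, rfl⟩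
      have hm'm : m' = m := le_antisymm
        (hismax m' (by simp [PySem.List.max?_mem hm']))
        (PySem.List.max?_isMax hm' m hmt)
      have hdne : d ≠ m := by omega
      rw [PySem.List.index?_cons_of_ne _ hdne] at hidx
      cases hjt : PySem.List.index? t m with
      | none => rw [hjt] at hidx; simp at hidx
      | some j' =>
        rw [hjt] at hidx
        simp only [Option.map_some] at hidx
        have hj : j = j' + 1 := (Option.some.injEq _ _).mp hidx |>.symm
        have := ih (i + 1) largest li m j' ⟨x, hxt, hlx⟩ (hm'm ▸ hm') hjt
        rw [this, hj]
        congr 1; congr 1; push_cast; ring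

-- ===== VERDICT (by name: the statement is the Claim_ definition above) =====
theorem get_largest_index_and_digit_spec : Claim_equal_get_largest_index_and_digit := by
  intro xs _ hpre
  obtain ⟨x, hxmem, hxpos⟩ := hpre
  obtain ⟨m, hm⟩ : ∃ m, PySem.List.max? xs (fun y => y) = some m := by
    cases h : PySem.List.max? xs (fun y => y) with
    | none => exact absurd ((PySem.List.max?_eq_none_iff _ _).mp h) (List.ne_nil_of_mem hxmem)
    | some v => exact ⟨v, rfl⟩
  have hxm : x ≤ m := PySem.List.max?_isMax hm x hxmem
  have hmpos : 0 < m := lt_of_lt_of_le hxpos hxm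
  obtain ⟨j, hj⟩ : ∃ j, PySem.List.index? xs m = some j :=
    Option.isSome_iff_exists.mp ((PySem.List.index?_isSome_iff _ _).mpr (PySem.List.max?_mem hm))
  have hloop := laLoop_pos xs 0 0 none m j ⟨x, hxmem, hxpos⟩ hm hj
  unfold Spec_get_largest_index_and_digit get_largest_index_and_digit get_largest_index_and_digit_alt
  rw [hloop, hm]
  rw [PySem.List.index?_eq_idxOf?] at hj
  simp [hj, not_le.mpr hmpos]
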